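-- pv_equiv track=rewrite | github.com/eyash24/ML-AudioTamperingDetection | scripts/log.py | endPartition
-- ===== SOURCE A (Python) =====
-- def endPartition(string, match):
--     try:
--         index = -1
--         while string[index]!= match:
--             index -= 1
--         return [string[:index], string[index:]]
--     except Exception as er:
--         raise er
-- ===== SOURCE B (Python) =====
-- def endPartition(string, match):
--     # one forward pass: collect every index whose element equals match;
--     # positions[-1] raises IndexError when there is no match, as in the original.
--     positions = [i for i, c in enumerate(string) if c == match]
--     i = positions[-1]
--     return [string[:i], string[i:]]
-- ===== Notes on version B (the rewrite author's own statement) =====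
-- stated objective: idiomatic
-- what changed: Replaces the backward negative-index while-loop with a single forward enumerate pass that collects all matching indices and splits at the last one (positions[-1] reproduces the IndexError when there is no match).
import Mathlib
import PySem

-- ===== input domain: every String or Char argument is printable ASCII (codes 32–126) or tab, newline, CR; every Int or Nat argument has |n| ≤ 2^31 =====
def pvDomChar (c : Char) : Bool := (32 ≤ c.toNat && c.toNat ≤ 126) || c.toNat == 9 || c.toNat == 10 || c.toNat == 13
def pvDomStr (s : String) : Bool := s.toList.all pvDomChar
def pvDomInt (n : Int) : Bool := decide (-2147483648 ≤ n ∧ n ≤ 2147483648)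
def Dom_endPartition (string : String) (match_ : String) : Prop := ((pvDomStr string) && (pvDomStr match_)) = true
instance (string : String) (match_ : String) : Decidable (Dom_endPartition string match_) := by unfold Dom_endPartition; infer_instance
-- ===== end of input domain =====

-- B replaces A's backward while-loop by one forward pass collecting all matching
-- positions and splitting at the last one (same values, same IndexError cases).

-- ===== PORT A =====
-- A's while loop: index counts down from -1 until string[index] == match.
-- fuel bounds the iterations; |s|+1 steps always suffice, since after |s| decrements
-- string[index] is an IndexError (pyGet? = none), the 'none' branch.
def endPartitionLoopA (s m : List Char) : Nat → Int → Option Int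
  | 0, _ => none
  | fuel + 1, index =>
    match PySem.List.pyGet? s index with
    | none => none          -- IndexError: no match anywhere (A re-raises; outside Pre_)
    | some c => if [c] ≠ m then endPartitionLoopA s m fuel (index - 1) else some index

def endPartition (string : String) (match_ : String) : List String :=
  match endPartitionLoopA string.toList match_.toList (string.toList.length + 1) (-1) with
  | none => []              -- A raises here; outside Pre_
  | some index =>
      [String.ofList (PySem.List.slice string.toList none (some index)),
       String.ofList (PySem.List.slice string.toList (some index) none)]

-- ===== PORT B =====
def endPartition_alt (string : String) (match_ : String) : List String :=
  let positions :=
    ((PySem.List.enumerate string.toList).filter (fun p => [p.2] == match_.toList)).map (·.1)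
  match PySem.List.pyGet? positions (-1) with
  | none => []              -- positions[-1] is an IndexError; outside Pre_
  | some i =>
      [String.ofList (PySem.List.slice string.toList none (some i)),
       String.ofList (PySem.List.slice string.toList (some i) none)]

-- ===== PRECONDITION & SPEC =====
-- Pre_ = exactly the inputs where the Python A returns: some element of string equals
-- match (so match is a single character occurring in string); else A raises IndexError.
def Pre_endPartition (string : String) (match_ : String) : Prop :=
  string.toList.any (fun c => [c] == match_.toList) = true
instance (string : String) (match_ : String) : Decidable (Pre_endPartition string match_) := by
  unfold Pre_endPartition; infer_instance

def pvWitness_endPartition : String × String := ("aba", "a")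

def Spec_endPartition (string : String) (match_ : String) (out : List String) : Prop := out = endPartition_alt string match_
instance (string : String) (match_ : String) (out : List String) : Decidable (Spec_endPartition string match_ out) := by unfold Spec_endPartition; infer_instance

-- ===== CLAIM (what is proved, stated in full; the proofs are below) =====
def Claim_equal_endPartition : Prop := ∀ (string : String) (match_ : String), Dom_endPartition string match_ → Pre_endPartition string match_ → Spec_endPartition string match_ (endPartition string match_)

-- ===== LEMMAS AND PROOFS =====

-- B's positions list, parametrised by the enumerate start value
def posList (s m : List Char) (start : Int) : List Int :=
  ((PySem.List.enumerate s start).filter (fun p => [p.2] == m)).map (·.1)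

lemma mem_posList (m : List Char) : ∀ (s : List Char) (start i : Int),
    i ∈ posList s m start ↔ ∃ (k : Nat) (hk : k < s.length), i = start + k ∧ [s[k]] = m := by
  intro s
  induction s with
  | nil => simp [posList, PySem.List.enumerate]
  | cons x t ih =>
    intro start i
    constructor
    · intro h
      simp only [posList, PySem.List.enumerate_cons, List.filter_cons] at h
      by_cases hx : ([x] == m) = true
      · simp only [hx, if_pos, List.map_cons, List.mem_cons] at h
        rcases h with h | h
        · exact ⟨0, by simp, by simpa using h, by simpa using hx⟩
        · obtain ⟨k, hk, hi, hm⟩ := (ih (start + 1) i).mp h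
          exact ⟨k + 1, by simp only [List.length_cons]; omega,
            by push_cast at hi ⊢; omega, by simpa using hm⟩
      · simp only [hx, if_neg, Bool.false_eq_true, not_false_iff] at h
        obtain ⟨k, hk, hi, hm⟩ := (ih (start + 1) i).mp h
        exact ⟨k + 1, by simp only [List.length_cons]; omega,
          by push_cast at hi ⊢; omega, by simpa using hm⟩
    · rintro ⟨k, hk, rfl, hm⟩
      match k with
      | 0 =>
        simp only [posList, PySem.List.enumerate_cons, List.filter_cons]
        have hx : ([x] == m) = true := by simpa using hm
        simp [hx]
      | k + 1 =>
        have hmem : (start + (k + 1 : Nat) : Int) ∈ posList t m (start + 1) := by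
          refine (ih (start + 1) _).mpr
            ⟨k, by simp only [List.length_cons] at hk; omega, by push_cast; ring,
             by simpa using hm⟩
        simp only [posList, PySem.List.enumerate_cons, List.filter_cons]
        by_cases hx : ([x] == m) = true
        · rw [if_pos hx]
          exact List.mem_cons_of_mem _ hmem
        · rw [if_neg hx]
          exact hmem

lemma pairwise_posList (m : List Char) : ∀ (s : List Char) (start : Int),
    (posList s m start).Pairwise (· < ·) := by
  intro s
  induction s with
  | nil => simp [posList, PySem.List.enumerate]
  | cons x t ih =>
    intro start
    simp only [posList, PySem.List.enumerate_cons, List.filter_cons]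
    by_cases hx : ([x] == m) = true
    · simp only [hx, if_pos, List.map_cons]
      refine List.Pairwise.cons ?_ (ih (start + 1))
      intro i hi
      obtain ⟨k, hk, rfl, -⟩ := (mem_posList m t (start + 1) i).mp hi
      omega
    · simpa [hx] using ih (start + 1)

lemma getLast_max (l : List Int) (hp : l.Pairwise (· < ·)) (h : l ≠ []) :
    ∀ x ∈ l, x ≤ l.getLast h := by
  induction l with
  | nil => simp at h
  | cons a t ih =>
    intro x hx
    rcases List.mem_cons.mp hx with rfl | hx
    · match t with
      | [] => simp
      | b :: t' =>
        have hab : x < b := (List.pairwise_cons.mp hp).1 b (by simp)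
        have := ih (List.pairwise_cons.mp hp).2 (by simp) b (by simp)
        rw [List.getLast_cons (by simp)]
        omega
    · have ht : t ≠ [] := by rintro rfl; simp at hx
      rw [List.getLast_cons ht]
      exact ih (List.pairwise_cons.mp hp).2 ht x hx

lemma pyGet?_neg_one_getLast (l : List Int) (h : l ≠ []) :
    PySem.List.pyGet? l (-1) = some (l.getLast h) := by
  have hl : 1 ≤ l.length := List.length_pos_iff.mpr h
  simp only [PySem.List.pyGet?, PySem.List.pyIdx?]
  norm_num [hl]
  rw [List.getLast_eq_getElem]
  exact List.getElem?_eq_getElem _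

lemma loopA_spec (s m : List Char) (j : Nat) (hj : j < s.length)
    (hm : [s[j]] = m)
    (hlast : ∀ (k : Nat) (hk : k < s.length), j < k → ¬([s[k]'hk] = m)) :
    ∀ (fuel : Nat) (index : Int), (j : Int) - s.length ≤ index → index ≤ -1 →
      (index - ((j : Int) - s.length)).toNat < fuel →
      endPartitionLoopA s m fuel index = some ((j : Int) - s.length) := by
  intro fuel
  induction fuel with
  | zero => intro index _ _ hf; omega
  | succ f ih =>
    intro index hlo hhi hf
    have hn : -(s.length : Int) ≤ index := by omega
    have hqlt : ((s.length : Int) + index).toNat < s.length := by omega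
    have hq : PySem.List.pyGet? s index
        = some (s[((s.length : Int) + index).toNat]'hqlt) := by
      simp only [PySem.List.pyGet?, PySem.List.pyIdx?]
      have h0 : ¬ (0 ≤ index) := by omega
      rw [if_neg h0, if_pos hn]
      have he : s.length - (-index).toNat = ((s.length : Int) + index).toNat := by omega
      rw [he]
      simp only [Option.bind_some]
      exact List.getElem?_eq_getElem _
    rw [endPartitionLoopA, hq]
    change (if [s[((s.length : Int) + index).toNat]'hqlt] ≠ m
        then endPartitionLoopA s m f (index - 1) else some index) = _
    by_cases hqj : ((s.length : Int) + index).toNat = j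
    · have hmq : [s[((s.length : Int) + index).toNat]'hqlt] = m := by
        subst hqj; exact hm
      rw [if_neg (by simp [hmq])]
      have hidx : index = (j : Int) - s.length := by omega
      rw [hidx]
    · have hgt : j < ((s.length : Int) + index).toNat := by omega
      have hnem := hlast _ hqlt hgt
      rw [if_pos hnem]
      exact ih (index - 1) (by omega) (by omega) (by omega)

-- ===== VERDICT (by name: the statement is the Claim_ definition above) =====
theorem endPartition_spec : Claim_equal_endPartition := by
  intro string match_ _ hpre
  unfold Spec_endPartition
  set s := string.toList with hs
  set m := match_.toList with hmdef
  obtain ⟨c, hc, hcm⟩ := List.any_eq_true.mp hpre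
  have hcm' : [c] = m := by simpa using hcm
  obtain ⟨k0, hk0, rfl⟩ := List.mem_iff_getElem.mp hc
  have hmem0 : ((0 : Int) + k0) ∈ posList s m 0 :=
    (mem_posList m s 0 _).mpr ⟨k0, hk0, rfl, hcm'⟩
  have hne : posList s m 0 ≠ [] := by
    intro h0; rw [h0] at hmem0; simp at hmem0
  obtain ⟨j, hj, hJ, hmj⟩ := (mem_posList m s 0 _).mp (List.getLast_mem hne)
  have hlast : ∀ (k : Nat) (hk : k < s.length), j < k → ¬([s[k]'hk] = m) := by
    intro k hk hgt heq
    have hmemk : ((0 : Int) + k) ∈ posList s m 0 :=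
      (mem_posList m s 0 _).mpr ⟨k, hk, rfl, heq⟩
    have := getLast_max _ (pairwise_posList m s 0) hne _ hmemk
    rw [hJ] at this
    omega
  have hloop := loopA_spec s m j hj hmj hlast (s.length + 1) (-1)
    (by omega) (by omega) (by omega)
  have hget : PySem.List.pyGet? (posList s m 0) (-1) = some ((0 : Int) + j) := by
    rw [pyGet?_neg_one_getLast _ hne, hJ]
  have e2 : ((0 : Int) + j) = ((j : Nat) : Int) := by omega
  rw [e2] at hget
  have hget' : PySem.List.pyGet?
      (((PySem.List.enumerate s).filter (fun p => [p.2] == m)).map (·.1)) (-1)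
        = some ((j : Nat) : Int) := hget
  have hk1 : (0 : Nat) < s.length - j := by omega
  have e1 : (j : Int) - s.length = -((s.length - j : Nat) : Int) := by omega
  rw [e1] at hloop
  simp only [endPartition, endPartition_alt, ← hs, ← hmdef, hloop, hget']
  rw [PySem.List.slice_to_neg_natCast s _ hk1, PySem.List.slice_from_neg_natCast s _ hk1,
    PySem.List.slice_to s (by omega), PySem.List.slice_from s (by omega)]
  have e3 : s.length - (s.length - j) = (((j : Nat) : Int)).toNat := by omega
  rw [e3]
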